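-- pv_equiv track=rewrite | github.com/pulsekascade/student-gradebook-manager | gradebook_v4.py | categorize_scores
-- ===== SOURCE A (Python) =====
-- def categorize_scores(scores):
--     # Categorize scores by NCEA standards
--     categories = {"Not Achieved": 0, "Achieved": 0, "Merit": 0, "Excellence": 0}
--     for score in scores:
--         if 0 <= score <= 49:
--             categories["Not Achieved"] += 1
--         elif 50 <= score <= 64:
--             categories["Achieved"] += 1
--         elif 65 <= score <= 84:
--             categories["Merit"] += 1
--         elif 85 <= score <= 100:
--             categories["Excellence"] += 1
--     return categories
-- ===== SOURCE B (Python) =====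
-- def categorize_scores(scores):
--     # Categorize scores by NCEA standards: one counting pass per category
--     return {
--         "Not Achieved": sum(1 for s in scores if 0 <= s <= 49),
--         "Achieved": sum(1 for s in scores if 50 <= s <= 64),
--         "Merit": sum(1 for s in scores if 65 <= s <= 84),
--         "Excellence": sum(1 for s in scores if 85 <= s <= 100),
--     }
-- ===== Notes on version B (the rewrite author's own statement) =====
-- stated objective: simpler
-- what changed: Replaced A's single pass that mutates a counter dict through an if/elif chain by four independent counting passes, one per category, building the result dict directly from the four counts.
import Mathlib
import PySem

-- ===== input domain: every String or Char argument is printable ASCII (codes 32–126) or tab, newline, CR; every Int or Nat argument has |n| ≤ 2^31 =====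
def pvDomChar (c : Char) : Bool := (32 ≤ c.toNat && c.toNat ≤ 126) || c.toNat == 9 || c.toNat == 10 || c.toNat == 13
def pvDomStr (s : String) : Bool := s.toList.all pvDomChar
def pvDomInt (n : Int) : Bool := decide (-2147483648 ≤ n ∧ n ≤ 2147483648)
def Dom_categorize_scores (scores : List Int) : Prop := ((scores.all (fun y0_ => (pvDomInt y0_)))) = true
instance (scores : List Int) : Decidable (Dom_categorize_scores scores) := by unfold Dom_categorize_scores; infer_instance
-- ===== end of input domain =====

-- B replaces A's single mutating pass through an if/elif chain by four
-- independent counting passes, one per category (objective: simpler).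

-- ===== PORT A =====
-- literal transliteration of A's elif chain; `categories[k] += 1` is modify k (+1)
def categorize_scores (scores : List Int) : List (String × Int) :=
  (scores.foldl (fun categories score =>
      if 0 ≤ score ∧ score ≤ 49 then categories.modify "Not Achieved" 0 (· + 1)
      else if 50 ≤ score ∧ score ≤ 64 then categories.modify "Achieved" 0 (· + 1)
      else if 65 ≤ score ∧ score ≤ 84 then categories.modify "Merit" 0 (· + 1)
      else if 85 ≤ score ∧ score ≤ 100 then categories.modify "Excellence" 0 (· + 1)
      else categories)
    (PySem.Dict.ofList [("Not Achieved", 0), ("Achieved", 0), ("Merit", 0), ("Excellence", 0)])).items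

-- ===== PORT B =====
-- sum(1 for s in scores if lo <= s <= hi)
def pvCount (lo hi : Int) (scores : List Int) : Int :=
  scores.foldl (fun acc s => if lo ≤ s ∧ s ≤ hi then acc + 1 else acc) 0

def categorize_scores_alt (scores : List Int) : List (String × Int) :=
  [("Not Achieved", pvCount 0 49 scores),
   ("Achieved", pvCount 50 64 scores),
   ("Merit", pvCount 65 84 scores),
   ("Excellence", pvCount 85 100 scores)]

-- ===== PRECONDITION & SPEC =====
def Spec_categorize_scores (scores : List Int) (out : List (String × Int)) : Prop := out = categorize_scores_alt scores
instance (scores : List Int) (out : List (String × Int)) : Decidable (Spec_categorize_scores scores out) := by unfold Spec_categorize_scores; infer_instance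

-- ===== CLAIM =====
def Claim_equal_categorize_scores : Prop := ∀ (scores : List Int), Dom_categorize_scores scores → Spec_categorize_scores scores (categorize_scores scores)

-- ===== LEMMAS AND PROOFS =====
theorem pvCount_from (lo hi : Int) (scores : List Int) : ∀ a : Int,
    scores.foldl (fun acc s => if lo ≤ s ∧ s ≤ hi then acc + 1 else acc) a
      = a + pvCount lo hi scores := by
  induction scores with
  | nil => intro a; simp [pvCount]
  | cons s rest ih =>
      intro a
      simp only [pvCount, List.foldl_cons]
      split_ifs with h
      · rw [ih (a + 1), ih (0 + 1)]; omega
      · rw [ih a, ih 0]; omega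

theorem pvCount_cons (lo hi s : Int) (rest : List Int) :
    pvCount lo hi (s :: rest) = (if lo ≤ s ∧ s ≤ hi then 1 else 0) + pvCount lo hi rest := by
  simp only [pvCount, List.foldl_cons]
  rw [pvCount_from, pvCount_from]
  split_ifs <;> omega

theorem pvModNA (a b c d : Int) :
    (PySem.Dict.mk [("Not Achieved", a), ("Achieved", b), ("Merit", c), ("Excellence", d)]).modify "Not Achieved" 0 (· + 1)
    = PySem.Dict.mk [("Not Achieved", a + 1), ("Achieved", b), ("Merit", c), ("Excellence", d)] := by
  apply PySem.Dict.ext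
  simp [PySem.Dict.modify, PySem.Dict.getD, PySem.Dict.get?, PySem.Dict.contains, PySem.Dict.insert]

theorem pvModAch (a b c d : Int) :
    (PySem.Dict.mk [("Not Achieved", a), ("Achieved", b), ("Merit", c), ("Excellence", d)]).modify "Achieved" 0 (· + 1)
    = PySem.Dict.mk [("Not Achieved", a), ("Achieved", b + 1), ("Merit", c), ("Excellence", d)] := by
  apply PySem.Dict.ext
  simp [PySem.Dict.modify, PySem.Dict.getD, PySem.Dict.get?, PySem.Dict.contains, PySem.Dict.insert]

theorem pvModMer (a b c d : Int) :
    (PySem.Dict.mk [("Not Achieved", a), ("Achieved", b), ("Merit", c), ("Excellence", d)]).modify "Merit" 0 (· + 1)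
    = PySem.Dict.mk [("Not Achieved", a), ("Achieved", b), ("Merit", c + 1), ("Excellence", d)] := by
  apply PySem.Dict.ext
  simp [PySem.Dict.modify, PySem.Dict.getD, PySem.Dict.get?, PySem.Dict.contains, PySem.Dict.insert]

theorem pvModExc (a b c d : Int) :
    (PySem.Dict.mk [("Not Achieved", a), ("Achieved", b), ("Merit", c), ("Excellence", d)]).modify "Excellence" 0 (· + 1)
    = PySem.Dict.mk [("Not Achieved", a), ("Achieved", b), ("Merit", c), ("Excellence", d + 1)] := by
  apply PySem.Dict.ext
  simp [PySem.Dict.modify, PySem.Dict.getD, PySem.Dict.get?, PySem.Dict.contains, PySem.Dict.insert]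

theorem pvFold_items (scores : List Int) : ∀ a b c d : Int,
    (scores.foldl (fun categories score =>
      if 0 ≤ score ∧ score ≤ 49 then categories.modify "Not Achieved" 0 (· + 1)
      else if 50 ≤ score ∧ score ≤ 64 then categories.modify "Achieved" 0 (· + 1)
      else if 65 ≤ score ∧ score ≤ 84 then categories.modify "Merit" 0 (· + 1)
      else if 85 ≤ score ∧ score ≤ 100 then categories.modify "Excellence" 0 (· + 1)
      else categories)
      (PySem.Dict.mk [("Not Achieved", a), ("Achieved", b), ("Merit", c), ("Excellence", d)])).items
    = [("Not Achieved", a + pvCount 0 49 scores),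
       ("Achieved", b + pvCount 50 64 scores),
       ("Merit", c + pvCount 65 84 scores),
       ("Excellence", d + pvCount 85 100 scores)] := by
  induction scores with
  | nil => intro a b c d; simp [pvCount]
  | cons s rest ih =>
      intro a b c d
      simp only [List.foldl_cons]
      split_ifs with h1 h2 h3 h4 <;>
        [rw [pvModNA]; rw [pvModAch]; rw [pvModMer]; rw [pvModExc]; skip] <;>
        rw [ih] <;>
        simp only [pvCount_cons, List.cons.injEq, Prod.mk.injEq, true_and, and_true] <;>
        split_ifs <;> omega

-- ===== VERDICT =====
theorem categorize_scores_spec : Claim_equal_categorize_scores := by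
  intro scores _
  show categorize_scores scores = categorize_scores_alt scores
  unfold categorize_scores categorize_scores_alt
  have h0 : PySem.Dict.ofList [("Not Achieved", (0:Int)), ("Achieved", 0), ("Merit", 0), ("Excellence", 0)]
      = PySem.Dict.mk [("Not Achieved", 0), ("Achieved", 0), ("Merit", 0), ("Excellence", 0)] := by decide
  rw [h0, pvFold_items]
  norm_num
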